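-- pv_equiv track=rewrite | github.com/dydfuf/Coding-Test | Programmers/Level3/expressed_by_N.py | solution
-- ===== SOURCE A (Python) =====
-- def solution(N, number):
--     answer = - 1
--     DP = []
--     for i in range(1, 9):
--         case_set = {int(str(N) * i)}
--
--         for j in range(0, i - 1):
--             for x in DP[j]:
--                 for y in DP[-j - 1]:
--                     case_set.add(x + y)
--                     case_set.add(x - y)
--                     case_set.add(x * y)
--                     if y != 0:
--                         case_set.add(x // y)
--         if number in case_set:
--             return i
--
--         DP.append(case_set)
--     return answer
-- ===== SOURCE B (Python) =====
-- def solution(N, number):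
--     memo = {}
--
--     def reachable(k):
--         # set of values formable with exactly k copies of the digit N
--         if k in memo:
--             return memo[k]
--         s = {int(str(N) * k)}
--         for j in range(1, k):
--             for x in reachable(j):
--                 for y in reachable(k - j):
--                     s.add(x + y)
--                     s.add(x - y)
--                     s.add(x * y)
--                     if y != 0:
--                         s.add(x // y)
--         memo[k] = s
--         return s
--
--     for k in range(1, 9):
--         if number in reachable(k):
--             return k
--     return -1
-- ===== Notes on version B (the rewrite author's own statement) =====
-- stated objective: alternative
-- what changed: Replaces the iterative DP-list with negative indexing by a memoized recursive helper reachable(k) returning the set of values formable with exactly k copies of N, then scans k=1..8 for the first hit.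
-- outside the precondition, e.g. on solution(-2, 5): A raises ValueError, B raises ValueError
import Mathlib
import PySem

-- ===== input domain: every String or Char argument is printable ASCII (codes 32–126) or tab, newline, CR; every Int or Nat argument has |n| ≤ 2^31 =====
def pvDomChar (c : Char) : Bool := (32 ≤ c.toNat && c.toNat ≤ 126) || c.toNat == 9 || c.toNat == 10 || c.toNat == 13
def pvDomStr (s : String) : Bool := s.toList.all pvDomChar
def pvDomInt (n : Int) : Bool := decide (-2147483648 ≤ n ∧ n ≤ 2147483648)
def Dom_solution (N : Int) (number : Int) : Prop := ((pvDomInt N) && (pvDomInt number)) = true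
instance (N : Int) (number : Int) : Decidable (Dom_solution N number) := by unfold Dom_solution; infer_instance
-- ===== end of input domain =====

-- B replaces A's iterative DP list (with negative indexing) by a memoized recursive
-- helper reachable(k); same values, same first-k-in-1..8 answer (objective: alternative).

-- ===== PORT A =====
-- str(N) * k  (Python string repetition, over List Char)
def pvStrMul (s : List Char) : Nat → List Char
  | 0 => []
  | n + 1 => pvStrMul s n ++ s

-- int(str(N) * k); the .getD 0 is unreachable under Pre_solution (int(...) raises
-- ValueError only for N < 0 repeated ≥ 2 times, excluded by Pre_)
def pvBase (N : Int) (k : Nat) : Int :=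
  (PySem.Int.ofChars? (pvStrMul (PySem.Int.toChars N) k)).getD 0

-- the inner 'for x in xs: for y in ys: add x+y, x-y, x*y, (y≠0) x//y' block,
-- identical in both Python sources
-- the internal Python sets are modelled by Std.TreeSet Int: the ports only ever
-- test membership and build further sets from them (never consume their hash order),
-- so a tree set is exact here and keeps evaluation fast
def pvCombine (cs0 : Std.TreeSet Int) (xs ys : Std.TreeSet Int) : Std.TreeSet Int :=
  xs.toList.foldl (fun cs x =>
    ys.toList.foldl (fun cs y =>
      let cs := ((cs.insert (x + y)).insert (x - y)).insert (x * y)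
      if y ≠ 0 then cs.insert (PySem.Int.floordiv x y) else cs) cs) cs0

-- case_set of round i: starts from {int(str(N)*i)}, then the j-loop over DP[j] × DP[-j-1]
def caseA (N : Int) (i : Nat) (DP : List (Std.TreeSet Int)) : Std.TreeSet Int :=
  (List.range (i - 1)).foldl
    (fun cs (j : Nat) =>
      pvCombine cs (PySem.List.pyGetD DP (j : Int) Std.TreeSet.empty)        -- DP[j]
        (PySem.List.pyGetD DP (-(j : Int) - 1) Std.TreeSet.empty))   -- DP[-j-1]
    (Std.TreeSet.empty.insert (pvBase N i))

-- A's 'for i in range(1, 9)' loop with early return, carrying the DP list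
def solLoopA (N number : Int) (i : Nat) (DP : List (Std.TreeSet Int)) : Int :=
  if i ≤ 8 then
    let case_set := caseA N i DP
    if case_set.contains number then (i : Int)
    else solLoopA N number (i + 1) (DP ++ [case_set])
  else -1
termination_by 9 - i

def solution (N : Int) (number : Int) : Int := solLoopA N number 1 []

-- ===== PORT B =====
-- reachable(k): the set of values formable with exactly k copies of N
-- (the Python memo dict is pure memoization; the recursion computes the same sets)
def reachB (N : Int) (k : Nat) : Std.TreeSet Int :=
  (List.range' 1 (k - 1)).attach.foldl
    (fun s j => pvCombine s (reachB N j.1) (reachB N (k - j.1)))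
    (Std.TreeSet.empty.insert (pvBase N k))
termination_by k
decreasing_by
  all_goals (have h := List.mem_range'_1.mp j.2; omega)

-- B's 'for k in range(1, 9)' scan
def solLoopB (N number : Int) (k : Nat) : Int :=
  if k ≤ 8 then
    if (reachB N k).contains number then (k : Int) else solLoopB N number (k + 1)
  else -1
termination_by 9 - k

def solution_alt (N : Int) (number : Int) : Int := solLoopB N number 1

-- ===== PRECONDITION & SPEC =====
-- Pre_ excludes exactly the inputs where A raises ValueError: for N < 0 with
-- number ≠ N the loop reaches int(str(N)*2) = int("-…-…"), which raises (B raises there too).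
def Pre_solution (N : Int) (number : Int) : Prop := 0 ≤ N ∨ number = N
instance (N : Int) (number : Int) : Decidable (Pre_solution N number) := by unfold Pre_solution; infer_instance
def pvWitness_solution : Int × Int := (5, 12)

def Spec_solution (N : Int) (number : Int) (out : Int) : Prop := out = solution_alt N number
instance (N : Int) (number : Int) (out : Int) : Decidable (Spec_solution N number out) := by unfold Spec_solution; infer_instance

-- ===== CLAIM (what is proved, stated in full; the proofs are below) =====
def Claim_equal_solution : Prop := ∀ (N : Int) (number : Int), Dom_solution N number → Pre_solution N number → Spec_solution N number (solution N number)

-- ===== LEMMAS AND PROOFS =====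

-- the attach-fold in reachB, as a plain fold
theorem attach_foldl_pv_aux (N : Int) (k : Nat) (L : List Nat)
    (xs : List {x // x ∈ L}) (init : Std.TreeSet Int) :
    xs.foldl (fun s j => pvCombine s (reachB N j.1) (reachB N (k - j.1))) init
      = (xs.map Subtype.val).foldl (fun s j => pvCombine s (reachB N j) (reachB N (k - j))) init := by
  induction xs generalizing init with
  | nil => rfl
  | cons a xs ih => simp only [List.foldl_cons, List.map_cons]; exact ih _

theorem attach_foldl_pv (N : Int) (k : Nat) (l : List Nat) (init : Std.TreeSet Int) :
    l.attach.foldl (fun s j => pvCombine s (reachB N j.1) (reachB N (k - j.1))) init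
      = l.foldl (fun s j => pvCombine s (reachB N j) (reachB N (k - j))) init := by
  rw [attach_foldl_pv_aux, List.attach_map_subtype_val]

-- A's case_set at round i, built from DP = [reachB 1, …, reachB (i-1)], is reachB i
theorem buildA_eq_reach (N : Int) (i : Nat) (hi : 1 ≤ i) :
    caseA N i ((List.range' 1 (i - 1)).map (reachB N)) = reachB N i := by
  unfold caseA
  conv_rhs => rw [reachB]
  rw [attach_foldl_pv]
  conv_rhs => rw [List.range'_eq_map_range, List.foldl_map]
  refine PySem.List.foldl_congr_mem _ _ _ _ ?_
  intro cs j hj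
  have hjlt : j < i - 1 := List.mem_range.mp hj
  have h1 : PySem.List.pyGetD ((List.range' 1 (i - 1)).map (reachB N)) (j : Int) Std.TreeSet.empty
      = reachB N (1 + j) := by
    rw [PySem.List.pyGetD_natCast,
      List.getD_eq_getElem _ _ (by simp only [List.length_map, List.length_range']; exact hjlt)]
    simp
  have h2 : PySem.List.pyGetD ((List.range' 1 (i - 1)).map (reachB N)) (-(j : Int) - 1) Std.TreeSet.empty
      = reachB N (i - (1 + j)) := by
    have hcast : (-(j : Int) - 1) = -(((j + 1 : Nat)) : Int) := by push_cast; ring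
    rw [hcast, PySem.List.pyGetD_neg_natCast _ _ _ (by omega)
      (by simp only [List.length_map, List.length_range']; omega)]
    simp only [List.length_map, List.length_range', List.getElem_map, List.getElem_range'_1]
    congr 1
    omega
  rw [h1, h2]

theorem loop_eq (N number : Int) (f i : Nat) (hi : 1 ≤ i) (hf : 9 - i = f) :
    solLoopA N number i ((List.range' 1 (i - 1)).map (reachB N)) = solLoopB N number i := by
  induction f generalizing i with
  | zero =>
    rw [solLoopA, solLoopB]
    rw [if_neg (by omega), if_neg (by omega)]
  | succ f ih =>
    have h8 : i ≤ 8 := by omega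
    rw [solLoopA, solLoopB]
    rw [if_pos h8, if_pos h8]
    simp only [buildA_eq_reach N i hi]
    by_cases hm : (reachB N i).contains number = true
    · rw [if_pos hm, if_pos hm]
    · rw [if_neg hm, if_neg hm]
      have hDP : (List.range' 1 (i - 1)).map (reachB N) ++ [reachB N i]
          = (List.range' 1 ((i + 1) - 1)).map (reachB N) := by
        have h' : (i + 1) - 1 = (i - 1) + 1 := by omega
        have h'' : 1 + 1 * (i - 1) = i := by omega
        rw [h', List.range'_concat, h'', List.map_append]
        simp
      rw [hDP]
      exact ih (i + 1) (by omega) (by omega)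

-- ===== VERDICT (by name: the statement is the Claim_ definition above) =====
theorem solution_spec : Claim_equal_solution := by
  intro N number _ _
  unfold Spec_solution solution solution_alt
  have h := loop_eq N number 8 1 (by omega) (by omega)
  simpa using h
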